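-- pv_equiv track=rewrite | github.com/Dino098098mrk/CCC_Python_Leo | S3_2011.py | isCrystal
-- ===== SOURCE A (Python) =====
-- def isCrystal(magLevel, x,y):
--   if magLevel == 1:
--     if (x,y) in {(1,0),(2,0),(3,0),(2,1)}:
--       return True
--     else:
--       return False
--
--   zoomout_x = x
--   zoomout_y = y
--   for i in range(magLevel-1):
--     zoomout_x //= 5
--     zoomout_y //= 5
--   if(zoomout_x, zoomout_y) in {(1,0),(2,0),(3,0),(2,1)}:
--     return True
--   elif(zoomout_x, zoomout_y) in {(1,1),(2,2),(3,1)}: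
--     return isCrystal(magLevel-1,x%(5**(magLevel-1)),y%(5**(magLevel-1)))
-- ===== SOURCE B (Python) =====
-- def isCrystal(magLevel, x, y):
--     # One iterative pass over the base-5 digit positions, MSD to LSD, keeping
--     # the current power of 5 and reducing x, y in place (no recursion, no
--     # re-zooming division chain per level).
--     p = 5 ** (magLevel - 1)
--     for _ in range(magLevel - 1):
--         dx = x // p
--         dy = y // p
--         if (dx, dy) in {(1, 0), (2, 0), (3, 0), (2, 1)}:
--             return True
--         if (dx, dy) not in {(1, 1), (2, 2), (3, 1)}:
--             return None
--         x -= dx * p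
--         y -= dy * p
--         p //= 5
--     return (x, y) in {(1, 0), (2, 0), (3, 0), (2, 1)}
-- ===== Notes on version B (the rewrite author's own statement) =====
-- stated objective: alternative
-- what changed: B replaces A's recursion (which re-runs a fresh magLevel-long chain of floor divisions at every level) with a single iterative MSD-to-LSD pass that keeps the current power of 5 and reduces x,y in place.
-- outside the precondition, e.g. on isCrystal(0, 0, 0): A returns None, B returns False
import Mathlib
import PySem

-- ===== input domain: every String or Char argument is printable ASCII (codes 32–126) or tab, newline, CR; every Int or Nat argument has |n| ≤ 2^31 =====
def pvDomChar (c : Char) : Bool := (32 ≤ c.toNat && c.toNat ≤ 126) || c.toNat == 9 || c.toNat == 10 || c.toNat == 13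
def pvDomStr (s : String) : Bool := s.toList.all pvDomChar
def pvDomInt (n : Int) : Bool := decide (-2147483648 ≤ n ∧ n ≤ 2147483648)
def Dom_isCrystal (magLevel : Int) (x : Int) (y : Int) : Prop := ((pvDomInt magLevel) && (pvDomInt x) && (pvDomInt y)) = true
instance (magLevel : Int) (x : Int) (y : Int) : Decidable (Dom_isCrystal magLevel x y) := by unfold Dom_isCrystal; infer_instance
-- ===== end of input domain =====

-- B does one iterative MSD-to-LSD pass over the base-5 digit positions, reducing
-- x,y in place, instead of A's recursion that re-zooms with a fresh division chain.

-- ===== PORT A =====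
-- membership in the two literal tuple sets of the Python source
def pvInS1 (a : Int) (b : Int) : Bool :=
  (a == 1 && b == 0) || (a == 2 && b == 0) || (a == 3 && b == 0) || (a == 2 && b == 1)
def pvInS2 (a : Int) (b : Int) : Bool :=
  (a == 1 && b == 1) || (a == 2 && b == 2) || (a == 3 && b == 1)

-- A's recursion, driven by fuel = magLevel.toNat; for magLevel ≥ 1 the fuel is
-- never exhausted (magLevel drops by exactly 1 per call, base case at 1).
def isCrystalGo : Nat → Int → Int → Int → Option Bool
  | 0, _, _, _ => none
  | fuel + 1, magLevel, x, y =>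
    if magLevel = 1 then
      if pvInS1 x y then some true else some false
    else
      let zx := (PySem.List.pyRange 0 (magLevel - 1) 1).foldl (fun z _ => PySem.Int.floordiv z 5) x
      let zy := (PySem.List.pyRange 0 (magLevel - 1) 1).foldl (fun z _ => PySem.Int.floordiv z 5) y
      if pvInS1 zx zy then some true
      else if pvInS2 zx zy then
        isCrystalGo fuel (magLevel - 1)
          (PySem.Int.mod x ((5 : Int) ^ (magLevel - 1).toNat))
          (PySem.Int.mod y ((5 : Int) ^ (magLevel - 1).toNat))
      else none

def isCrystal (magLevel : Int) (x : Int) (y : Int) : Option Bool :=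
  isCrystalGo magLevel.toNat magLevel x y

-- ===== PORT B =====
-- the for-loop of Source B: counter of remaining iterations, current power p, reduced x y
def isCrystalAltGo : Nat → Int → Int → Int → Option Bool
  | 0, _, x, y => some (pvInS1 x y)
  | k + 1, p, x, y =>
    let dx := PySem.Int.floordiv x p
    let dy := PySem.Int.floordiv y p
    if pvInS1 dx dy then some true
    else if !(pvInS2 dx dy) then none
    else isCrystalAltGo k (PySem.Int.floordiv p 5) (x - dx * p) (y - dy * p)

def isCrystal_alt (magLevel : Int) (x : Int) (y : Int) : Option Bool :=
  isCrystalAltGo (magLevel - 1).toNat ((5 : Int) ^ (magLevel - 1).toNat) x y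

-- ===== PRECONDITION & SPEC =====
-- Pre_ excludes magLevel ≤ 0, where A's behaviour is an accident of its empty zoom loop:
-- it returns None instead of False outside the pattern and recurses with float arguments
-- (5**(magLevel-1) is fractional), so no caller would specify either value.
def Pre_isCrystal (magLevel : Int) (x : Int) (y : Int) : Prop := 1 ≤ magLevel
instance (magLevel : Int) (x : Int) (y : Int) : Decidable (Pre_isCrystal magLevel x y) := by
  unfold Pre_isCrystal; infer_instance
def pvWitness_isCrystal : Int × Int × Int := (2, 7, 2)

def Spec_isCrystal (magLevel : Int) (x : Int) (y : Int) (out : Option Bool) : Prop := out = isCrystal_alt magLevel x y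
instance (magLevel : Int) (x : Int) (y : Int) (out : Option Bool) : Decidable (Spec_isCrystal magLevel x y out) := by unfold Spec_isCrystal; infer_instance

-- ===== CLAIM (what is proved, stated in full; the proofs are below) =====
def Claim_equal_isCrystal : Prop := ∀ (magLevel : Int) (x : Int) (y : Int), Dom_isCrystal magLevel x y → Pre_isCrystal magLevel x y → Spec_isCrystal magLevel x y (isCrystal magLevel x y)

-- ===== LEMMAS AND PROOFS =====

-- A's zoom loop of n floor-divisions by 5 is one floor division by 5^n.
theorem pvZoom (n : Nat) (x : Int) :
    (PySem.List.pyRange 0 (n : Int) 1).foldl (fun z _ => PySem.Int.floordiv z 5) x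
      = PySem.Int.floordiv x ((5 : Int) ^ n) := by
  induction n generalizing x with
  | zero => simp [PySem.List.pyRange, PySem.Int.floordiv, Int.fdiv_one]
  | succ n ih =>
    have h : ((n : Int) + 1) = ((n + 1 : Nat) : Int) := by push_cast; ring
    rw [← h, PySem.List.pyRange_one_succ_right (by omega), List.foldl_append]
    simp only [List.foldl_cons, List.foldl_nil, ih]
    show PySem.Int.floordiv (PySem.Int.floordiv x ((5:Int)^n)) 5 = PySem.Int.floordiv x ((5:Int)^(n+1))
    unfold PySem.Int.floordiv
    rw [Int.fdiv_fdiv_eq_fdiv_mul _ (by positivity) (by norm_num), pow_succ]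

theorem pvModSub (x p : Int) : PySem.Int.mod x p = x - PySem.Int.floordiv x p * p := by
  have := PySem.Int.floordiv_mul_add_mod x p; omega

theorem pvZoom' (m : Int) (hm : 0 ≤ m) (x : Int) :
    (PySem.List.pyRange 0 m 1).foldl (fun z _ => PySem.Int.floordiv z 5) x
      = PySem.Int.floordiv x ((5 : Int) ^ m.toNat) := by
  have h : m = ((m.toNat : Nat) : Int) := by omega
  rw [h]
  simp only [Int.toNat_natCast]
  exact pvZoom m.toNat x

theorem pvMain (n : Nat) : ∀ (x y : Int),
    isCrystalGo (n + 1) ((n : Int) + 1) x y = isCrystalAltGo n ((5 : Int) ^ n) x y := by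
  induction n with
  | zero =>
    intro x y
    simp only [isCrystalGo, isCrystalAltGo, Nat.cast_zero, zero_add]
    cases pvInS1 x y <;> simp
  | succ n ih =>
    intro x y
    have hne : ((n : Int) + 1) + 1 ≠ 1 := by omega
    have hm1 : (((n : Int) + 1) + 1) - 1 = ((n + 1 : Nat) : Int) := by push_cast; ring
    have htn : ((((n : Int) + 1) + 1) - 1).toNat = n + 1 := by omega
    simp only [Nat.cast_succ] at *
    have hcast : (((n : Int) + 1)).toNat = n + 1 := by omega
    rw [isCrystalGo]
    simp only [hne, if_false, hm1]
    rw [pvZoom' _ (by positivity), pvZoom' _ (by positivity)]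
    simp only [hcast]
    rw [isCrystalAltGo]
    set p : Int := (5 : Int) ^ (n + 1) with hp
    by_cases h1 : pvInS1 (PySem.Int.floordiv x p) (PySem.Int.floordiv y p)
    · simp [h1]
    · simp only [h1, Bool.not_eq_true] at *
      by_cases h2 : pvInS2 (PySem.Int.floordiv x p) (PySem.Int.floordiv y p)
      · simp only [h2, if_true, if_false, Bool.false_eq_true, Bool.not_true]
        have hdiv5 : PySem.Int.floordiv p 5 = (5 : Int) ^ n := by
          unfold PySem.Int.floordiv
          rw [hp, pow_succ, Int.mul_fdiv_cancel _ (by norm_num)]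
        rw [pvModSub x p, pvModSub y p, hdiv5]
        exact ih _ _
      · simp [h2]

-- ===== VERDICT (by name: the statement is the Claim_ definition above) =====
theorem isCrystal_spec : Claim_equal_isCrystal := by
  intro m x y _ hpre
  unfold Spec_isCrystal isCrystal isCrystal_alt
  have hpre' : 1 ≤ m := hpre
  obtain ⟨n, rfl⟩ : ∃ n : Nat, m = (n : Int) + 1 := ⟨(m - 1).toNat, by omega⟩
  have h1 : ((n : Int) + 1).toNat = n + 1 := by omega
  have h2 : (((n : Int) + 1) - 1).toNat = n := by omega
  rw [h1, h2]
  exact pvMain n x y
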